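-- pv_equiv track=rewrite | github.com/jbuggs-droid/2026-Conquest-Storage | scripts/extract_c64_maps.py | dilate
-- ===== SOURCE A (Python) =====
-- def dilate(mask: list[list[bool]], radius: int) -> list[list[bool]]:
--     h, w = len(mask), len(mask[0])
--     out = [[False] * w for _ in range(h)]
--     offsets = []
--     for dy in range(-radius, radius + 1):
--         for dx in range(-radius, radius + 1):
--             if abs(dx) + abs(dy) <= radius:
--                 offsets.append((dx, dy))
--     for y in range(h):
--         for x in range(w):
--             if not mask[y][x]:
--                 continue
--             for dx, dy in offsets:
--                 nx, ny = x + dx, y + dy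
--                 if 0 <= nx < w and 0 <= ny < h:
--                     out[ny][nx] = True
--     return out
-- ===== SOURCE B (Python) =====
-- def dilate(mask: list[list[bool]], radius: int) -> list[list[bool]]:
--     # Pure per-cell gather: each output cell looks at the diamond window around
--     # itself (clamped to the grid by the range bounds) instead of scattering
--     # from every true source cell into a mutable output grid.
--     h, w = len(mask), len(mask[0])
--     return [
--         [
--             any(
--                 mask[y + dy][x + dx]
--                 for dy in range(max(-radius, -y), min(radius, h - 1 - y) + 1)
--                 for dx in range(max(abs(dy) - radius, -x), min(radius - abs(dy), w - 1 - x) + 1)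
--             )
--             for x in range(w)
--         ]
--         for y in range(h)
--     ]
-- ===== Notes on version B (the rewrite author's own statement) =====
-- stated objective: alternative
-- what changed: A scatters: it precomputes the full diamond offset list and, for every true source cell, writes True through all offsets into a mutable output grid; B gathers: each output cell is a pure any() over its own diamond window with the grid bounds folded into the clamped range limits, so there is no offset list, no mutation, no per-write bound check, and offsets falling off the grid are never enumerated.
import Mathlib
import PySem

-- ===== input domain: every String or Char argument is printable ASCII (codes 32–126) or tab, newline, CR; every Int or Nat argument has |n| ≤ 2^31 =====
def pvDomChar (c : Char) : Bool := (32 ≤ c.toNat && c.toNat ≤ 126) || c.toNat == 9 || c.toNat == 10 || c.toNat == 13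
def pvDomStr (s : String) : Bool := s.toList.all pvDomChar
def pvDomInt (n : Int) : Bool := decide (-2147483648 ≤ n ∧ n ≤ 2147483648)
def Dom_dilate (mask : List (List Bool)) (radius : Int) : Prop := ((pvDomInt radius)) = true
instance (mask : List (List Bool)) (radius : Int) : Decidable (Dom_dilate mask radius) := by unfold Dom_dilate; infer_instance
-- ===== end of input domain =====

-- B replaces A's scatter (a precomputed diamond offset list written into a mutable output
-- grid) by a pure per-cell gather over the radius-clamped diamond window (objective: alternative).

-- ===== PORT A =====
-- mask[y][x]; used only with indices A has bound-checked (or that Pre_ keeps in range),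
-- where it is exact Python indexing.
def pvCell (g : List (List Bool)) (y x : Int) : Bool :=
  (g.getD y.toNat []).getD x.toNat false

-- out[ny][nx] = True; used only after A's own bound check 0 ≤ nx < w ∧ 0 ≤ ny < h,
-- where it is exact Python item assignment.
def pvSet (g : List (List Bool)) (ny nx : Int) : List (List Bool) :=
  g.set ny.toNat ((g.getD ny.toNat []).set nx.toNat true)

-- body of A's innermost loop 'for dx, dy in offsets: …'
def pvStepOff (w h y x : Int) (out : List (List Bool)) (p : Int × Int) : List (List Bool) :=
  let nx := x + p.1
  let ny := y + p.2
  if 0 ≤ nx ∧ nx < w ∧ 0 ≤ ny ∧ ny < h then pvSet out ny nx else out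

def dilate (mask : List (List Bool)) (radius : Int) : List (List Bool) :=
  let h : Int := mask.length
  let w : Int := (mask.headD []).length         -- len(mask[0]); Pre_ gives mask ≠ []
  let out0 : List (List Bool) := List.replicate h.toNat (List.replicate w.toNat false)
  let offsets : List (Int × Int) :=
    (PySem.List.pyRange (-radius) (radius + 1) 1).foldl (fun acc dy =>
      (PySem.List.pyRange (-radius) (radius + 1) 1).foldl (fun acc dx =>
        if ((dx.natAbs : Int) + (dy.natAbs : Int)) ≤ radius then acc ++ [(dx, dy)]
        else acc) acc) []
  (PySem.List.pyRange 0 h 1).foldl (fun out y =>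
    (PySem.List.pyRange 0 w 1).foldl (fun out x =>
      if pvCell mask y x then offsets.foldl (pvStepOff w h y x) out
      else out) out) out0

-- ===== PORT B =====
def dilate_alt (mask : List (List Bool)) (radius : Int) : List (List Bool) :=
  let h : Int := mask.length
  let w : Int := (mask.headD []).length
  (PySem.List.pyRange 0 h 1).map (fun y =>
    (PySem.List.pyRange 0 w 1).map (fun x =>
      (PySem.List.pyRange (max (-radius) (-y)) (min radius (h - 1 - y) + 1) 1).any (fun dy =>
        (PySem.List.pyRange (max ((dy.natAbs : Int) - radius) (-x))
            (min (radius - (dy.natAbs : Int)) (w - 1 - x) + 1) 1).any (fun dx =>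
          -- mask[y+dy][x+dx]; the clamped ranges keep both indices in range under Pre_
          (mask.getD (y + dy).toNat []).getD (x + dx).toNat false))))

-- ===== PRECONDITION & SPEC =====
-- Exactly the inputs on which the Python A returns: mask nonempty (else mask[0] raises
-- IndexError) and every row at least as long as the first (else reading mask[y][x] for
-- some x < len(mask[0]) raises IndexError).
def Pre_dilate (mask : List (List Bool)) (radius : Int) : Prop :=
  mask ≠ [] ∧ ∀ row ∈ mask, (mask.headD []).length ≤ row.length
instance (mask : List (List Bool)) (radius : Int) : Decidable (Pre_dilate mask radius) := by
  unfold Pre_dilate; infer_instance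

def pvWitness_dilate : List (List Bool) × Int := ([[true, false], [false, false]], 1)

def Spec_dilate (mask : List (List Bool)) (radius : Int) (out : List (List Bool)) : Prop := out = dilate_alt mask radius
instance (mask : List (List Bool)) (radius : Int) (out : List (List Bool)) : Decidable (Spec_dilate mask radius out) := by unfold Spec_dilate; infer_instance

-- ===== CLAIM (what is proved, stated in full; the proofs are below) =====
def Claim_equal_dilate : Prop := ∀ (mask : List (List Bool)) (radius : Int), Dom_dilate mask radius → Pre_dilate mask radius → Spec_dilate mask radius (dilate mask radius)

-- ===== LEMMAS AND PROOFS =====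

-- a rectangular h×w grid
def pvRect (g : List (List Bool)) (h w : Nat) : Prop :=
  g.length = h ∧ ∀ row ∈ g, row.length = w

-- one write of A's scatter hits target (ty,tx)
def pvHit (w h y x : Int) (p : Int × Int) (ty tx : Int) : Bool :=
  decide (0 ≤ x + p.1 ∧ x + p.1 < w ∧ 0 ≤ y + p.2 ∧ y + p.2 < h ∧ ty = y + p.2 ∧ tx = x + p.1)

lemma pvRect_set (g : List (List Bool)) (h w : Nat) (ny nx : Int)
    (hg : pvRect g h w) (h1 : 0 ≤ ny) (h2 : ny < h) : pvRect (pvSet g ny nx) h w := by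
  obtain ⟨hl, hr⟩ := hg
  have hb : ny.toNat < g.length := by omega
  constructor
  · simpa [pvSet] using hl
  · intro row hrow
    rcases List.mem_or_eq_of_mem_set hrow with hmem | heq
    · exact hr row hmem
    · subst heq
      rw [List.length_set, List.getD_eq_getElem g [] hb]
      exact hr _ (List.getElem_mem hb)

lemma pvCell_set (g : List (List Bool)) (h w : Nat) (ny nx ty tx : Int)
    (hg : pvRect g h w)
    (h1 : 0 ≤ ny) (h2 : ny < h) (h3 : 0 ≤ nx) (h4 : nx < w)
    (h5 : 0 ≤ ty) (h6 : ty < h) (h7 : 0 ≤ tx) (h8 : tx < w) :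
    pvCell (pvSet g ny nx) ty tx = if ty = ny ∧ tx = nx then true else pvCell g ty tx := by
  obtain ⟨hl, hr⟩ := hg
  have hb : ny.toNat < g.length := by omega
  have hrow : g.getD ny.toNat [] = g[ny.toNat] := List.getD_eq_getElem g [] hb
  have hrw : g[ny.toNat].length = w := hr _ (List.getElem_mem hb)
  unfold pvCell pvSet
  by_cases hy : ty = ny
  · subst hy
    have houter : (g.set ty.toNat ((g.getD ty.toNat []).set nx.toNat true)).getD ty.toNat []
        = (g.getD ty.toNat []).set nx.toNat true := by
      rw [List.getD_eq_getElem?_getD, List.getElem?_set_self hb]; rfl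
    rw [houter]
    by_cases hx : tx = nx
    · subst hx
      have hxb : tx.toNat < (g.getD ty.toNat []).length := by rw [hrow]; omega
      rw [List.getD_eq_getElem?_getD, List.getElem?_set_self hxb]
      simp
    · have hne : nx.toNat ≠ tx.toNat := by omega
      rw [List.getD_eq_getElem?_getD, List.getElem?_set_ne hne, ← List.getD_eq_getElem?_getD]
      simp [hx]
  · have hne : ny.toNat ≠ ty.toNat := by omega
    have houter : (g.set ny.toNat ((g.getD ny.toNat []).set nx.toNat true)).getD ty.toNat []
        = g.getD ty.toNat [] := by
      rw [List.getD_eq_getElem?_getD, List.getElem?_set_ne hne, ← List.getD_eq_getElem?_getD]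
    rw [houter]
    simp [hy]

-- A's inner offsets loop, characterized
lemma pvScatter_off (l : List (Int × Int)) (g : List (List Bool)) (h w : Nat) (y x : Int)
    (hg : pvRect g h w) :
    pvRect (l.foldl (pvStepOff (w : Int) (h : Int) y x) g) h w ∧
    ∀ ty tx : Int, 0 ≤ ty → ty < h → 0 ≤ tx → tx < w →
      pvCell (l.foldl (pvStepOff (w : Int) (h : Int) y x) g) ty tx
        = (pvCell g ty tx || l.any (fun p => pvHit (w : Int) (h : Int) y x p ty tx)) := by
  induction l generalizing g with
  | nil => exact ⟨hg, fun ty tx _ _ _ _ => by simp⟩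
  | cons p t ih =>
    have hg' : pvRect (pvStepOff (w : Int) (h : Int) y x g p) h w := by
      unfold pvStepOff
      dsimp only
      split_ifs with hc
      · exact pvRect_set g h w _ _ hg hc.2.2.1 hc.2.2.2
      · exact hg
    obtain ⟨ihr, ihc⟩ := ih _ hg'
    refine ⟨by simpa using ihr, fun ty tx h5 h6 h7 h8 => ?_⟩
    rw [List.foldl_cons, ihc ty tx h5 h6 h7 h8]
    have hcell : pvCell (pvStepOff (w : Int) (h : Int) y x g p) ty tx
        = (pvCell g ty tx || pvHit (w : Int) (h : Int) y x p ty tx) := by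
      unfold pvStepOff pvHit
      dsimp only
      split_ifs with hc
      · rw [pvCell_set g h w _ _ ty tx hg hc.2.2.1 hc.2.2.2 hc.1 hc.2.1 h5 h6 h7 h8]
        by_cases he : ty = y + p.2 ∧ tx = x + p.1
        · simp [he, hc]
        · have hn : ¬(0 ≤ x + p.1 ∧ x + p.1 < (w : Int) ∧ 0 ≤ y + p.2 ∧ y + p.2 < (h : Int)
              ∧ ty = y + p.2 ∧ tx = x + p.1) := by tauto
          simp only [he, if_false]
          simp
      · have hn : ¬(0 ≤ x + p.1 ∧ x + p.1 < (w : Int) ∧ 0 ≤ y + p.2 ∧ y + p.2 < (h : Int)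
            ∧ ty = y + p.2 ∧ tx = x + p.1) := by tauto
        simp [hn]
    rw [hcell]
    simp [Bool.or_assoc]

-- A's x-loop, characterized
lemma pvScatter_row (mask : List (List Bool)) (offs : List (Int × Int)) (xs : List Int)
    (g : List (List Bool)) (h w : Nat) (y : Int) (hg : pvRect g h w) :
    pvRect (xs.foldl (fun out x => if pvCell mask y x then offs.foldl (pvStepOff (w : Int) (h : Int) y x) out else out) g) h w ∧
    ∀ ty tx : Int, 0 ≤ ty → ty < h → 0 ≤ tx → tx < w →
      pvCell (xs.foldl (fun out x => if pvCell mask y x then offs.foldl (pvStepOff (w : Int) (h : Int) y x) out else out) g) ty tx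
        = (pvCell g ty tx || xs.any (fun x => pvCell mask y x && offs.any (fun p => pvHit (w : Int) (h : Int) y x p ty tx))) := by
  induction xs generalizing g with
  | nil => exact ⟨hg, fun ty tx _ _ _ _ => by simp⟩
  | cons x t ih =>
    by_cases hm : pvCell mask y x = true
    · obtain ⟨hr0, hc0⟩ := pvScatter_off offs g h w y x hg
      obtain ⟨ihr, ihc⟩ := ih _ hr0
      refine ⟨by simpa [List.foldl_cons, if_pos hm] using ihr, fun ty tx h5 h6 h7 h8 => ?_⟩
      rw [List.foldl_cons]
      rw [if_pos hm]
      rw [ihc ty tx h5 h6 h7 h8, hc0 ty tx h5 h6 h7 h8]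
      simp [hm, Bool.or_assoc]
    · obtain ⟨ihr, ihc⟩ := ih _ hg
      refine ⟨by simpa [List.foldl_cons, if_neg hm] using ihr, fun ty tx h5 h6 h7 h8 => ?_⟩
      rw [List.foldl_cons]
      rw [if_neg hm]
      rw [ihc ty tx h5 h6 h7 h8]
      have hm' : pvCell mask y x = false := by simpa using hm
      simp [hm']

-- A's y-loop, characterized
lemma pvScatter_all (mask : List (List Bool)) (offs : List (Int × Int)) (ys : List Int)
    (g : List (List Bool)) (h w : Nat) (hg : pvRect g h w) :
    pvRect (ys.foldl (fun out y => (PySem.List.pyRange 0 (w : Int) 1).foldl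
        (fun out x => if pvCell mask y x then offs.foldl (pvStepOff (w : Int) (h : Int) y x) out else out) out) g) h w ∧
    ∀ ty tx : Int, 0 ≤ ty → ty < h → 0 ≤ tx → tx < w →
      pvCell (ys.foldl (fun out y => (PySem.List.pyRange 0 (w : Int) 1).foldl
          (fun out x => if pvCell mask y x then offs.foldl (pvStepOff (w : Int) (h : Int) y x) out else out) out) g) ty tx
        = (pvCell g ty tx || ys.any (fun y => (PySem.List.pyRange 0 (w : Int) 1).any
            (fun x => pvCell mask y x && offs.any (fun p => pvHit (w : Int) (h : Int) y x p ty tx)))) := by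
  induction ys generalizing g with
  | nil => exact ⟨hg, fun ty tx _ _ _ _ => by simp⟩
  | cons y t ih =>
    obtain ⟨hr0, hc0⟩ := pvScatter_row mask offs (PySem.List.pyRange 0 (w : Int) 1) g h w y hg
    obtain ⟨ihr, ihc⟩ := ih _ hr0
    refine ⟨by simpa using ihr, fun ty tx h5 h6 h7 h8 => ?_⟩
    rw [List.foldl_cons, ihc ty tx h5 h6 h7 h8, hc0 ty tx h5 h6 h7 h8]
    simp [Bool.or_assoc]

-- the offset list A precomputes, as a membership condition
lemma pvMem_offsets (radius : Int) (p : Int × Int) :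
    p ∈ (PySem.List.pyRange (-radius) (radius + 1) 1).foldl (fun acc dy =>
      (PySem.List.pyRange (-radius) (radius + 1) 1).foldl (fun acc dx =>
        if ((dx.natAbs : Int) + (dy.natAbs : Int)) ≤ radius then acc ++ [(dx, dy)]
        else acc) acc) ([] : List (Int × Int))
    ↔ ((p.1.natAbs : Int) + (p.2.natAbs : Int) ≤ radius) := by
  rw [show (fun (acc : List (Int × Int)) (dy : Int) =>
      (PySem.List.pyRange (-radius) (radius + 1) 1).foldl (fun acc dx =>
        if ((dx.natAbs : Int) + (dy.natAbs : Int)) ≤ radius then acc ++ [(dx, dy)]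
        else acc) acc)
    = (fun acc dy => acc ++ ((PySem.List.pyRange (-radius) (radius + 1) 1).filter
        (fun dx => decide (((dx.natAbs : Int) + (dy.natAbs : Int)) ≤ radius))).map
        (fun dx => (dx, dy))) from by
      funext acc dy
      exact PySem.List.foldl_append_ite _ _ _ _,
    PySem.List.foldl_append_eq_flatMap]
  simp only [List.nil_append, List.mem_flatMap, List.mem_map, List.mem_filter,
    PySem.List.mem_pyRange_one, decide_eq_true_eq]
  constructor
  · rintro ⟨dy, hdy, dx, ⟨⟨hdx1, hdx2⟩, hle⟩, rfl⟩
    simpa using hle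
  · intro hle
    refine ⟨p.2, by omega, p.1, ⟨⟨by omega, by omega⟩, hle⟩, rfl⟩

lemma pvOut0_rect (h w : Nat) : pvRect (List.replicate h (List.replicate w false)) h w := by
  refine ⟨by simp, fun row hr => ?_⟩
  simp [List.eq_of_mem_replicate hr]

lemma pvCell_out0 (h w : Nat) (ty tx : Int) :
    pvCell (List.replicate h (List.replicate w false)) ty tx = false := by
  unfold pvCell
  by_cases hb : ty.toNat < h
  · rw [List.getD_replicate _ hb]
    by_cases hb2 : tx.toNat < w
    · rw [List.getD_replicate _ hb2]
    · rw [List.getD_eq_default]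
      simpa using hb2
  · have hrow : (List.replicate h (List.replicate w false)).getD ty.toNat [] = [] :=
      List.getD_eq_default _ _ (by simpa using hb)
    rw [hrow]
    simp

lemma pvCell_eq_getElem (G : List (List Bool)) (i j : Nat)
    (hi : i < G.length) (hj : j < G[i].length) :
    pvCell G (i : Int) (j : Int) = G[i][j] := by
  unfold pvCell
  rw [Int.toNat_natCast, Int.toNat_natCast, List.getD_eq_getElem _ _ hi,
    List.getD_eq_getElem _ _ hj]

-- the two per-cell loop conditions agree (A's scatter hits (ty,tx) iff B's gather finds a source)
lemma pvAny_eq (mask : List (List Bool)) (radius ty tx : Int)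
    (h5 : 0 ≤ ty) (h6 : ty < (mask.length : Int)) (h7 : 0 ≤ tx)
    (h8 : tx < ((mask.headD []).length : Int)) :
    ((PySem.List.pyRange 0 (mask.length : Int) 1).any fun y =>
      (PySem.List.pyRange 0 ((mask.headD []).length : Int) 1).any fun x =>
        pvCell mask y x &&
          ((PySem.List.pyRange (-radius) (radius + 1) 1).foldl (fun acc dy =>
            (PySem.List.pyRange (-radius) (radius + 1) 1).foldl (fun acc dx =>
              if ((dx.natAbs : Int) + (dy.natAbs : Int)) ≤ radius then acc ++ [(dx, dy)]
              else acc) acc) []).any fun p =>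
            pvHit ((mask.headD []).length : Int) (mask.length : Int) y x p ty tx)
    = ((PySem.List.pyRange (max (-radius) (-ty)) (min radius ((mask.length : Int) - 1 - ty) + 1) 1).any fun dy =>
        (PySem.List.pyRange (max ((dy.natAbs : Int) - radius) (-tx))
            (min (radius - (dy.natAbs : Int)) (((mask.headD []).length : Int) - 1 - tx) + 1) 1).any fun dx =>
          (mask.getD (ty + dy).toNat []).getD (tx + dx).toNat false) := by
  rw [Bool.eq_iff_iff]
  simp only [List.any_eq_true, PySem.List.mem_pyRange_one, Bool.and_eq_true, pvMem_offsets,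
    pvHit, decide_eq_true_eq]
  constructor
  · rintro ⟨y, hy, x, hx, hm, p, hp, hx1, hx2, hy1, hy2, hty, htx⟩
    refine ⟨-p.2, by omega, -p.1, by omega, ?_⟩
    have e1 : ty + -p.2 = y := by omega
    have e2 : tx + -p.1 = x := by omega
    rw [e1, e2]
    simpa [pvCell] using hm
  · rintro ⟨dy, hdy, dx, hdx, hm⟩
    refine ⟨ty + dy, by omega, tx + dx, by omega, by simpa [pvCell] using hm,
      (-dx, -dy), by simp only [Int.natAbs_neg]; omega, by omega, by omega, by omega, by omega, by omega, by omega⟩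

theorem dilate_spec : Claim_equal_dilate := by
  intro mask radius _ hpre
  unfold Spec_dilate
  obtain ⟨hne, hrows⟩ := hpre
  have hA : dilate mask radius
      = (PySem.List.pyRange 0 (mask.length : Int) 1).foldl (fun out y =>
          (PySem.List.pyRange 0 ((mask.headD []).length : Int) 1).foldl (fun out x =>
            if pvCell mask y x then
              ((PySem.List.pyRange (-radius) (radius + 1) 1).foldl (fun acc dy =>
                (PySem.List.pyRange (-radius) (radius + 1) 1).foldl (fun acc dx =>
                  if ((dx.natAbs : Int) + (dy.natAbs : Int)) ≤ radius then acc ++ [(dx, dy)]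
                  else acc) acc) []).foldl
                (pvStepOff ((mask.headD []).length : Int) (mask.length : Int) y x) out
            else out) out)
          (List.replicate (mask.length : Int).toNat
            (List.replicate ((mask.headD []).length : Int).toNat false)) := rfl
  have hB : dilate_alt mask radius
      = (PySem.List.pyRange 0 (mask.length : Int) 1).map (fun y =>
          (PySem.List.pyRange 0 ((mask.headD []).length : Int) 1).map (fun x =>
            (PySem.List.pyRange (max (-radius) (-y)) (min radius ((mask.length : Int) - 1 - y) + 1) 1).any (fun dy =>
              (PySem.List.pyRange (max ((dy.natAbs : Int) - radius) (-x))
                  (min (radius - (dy.natAbs : Int)) (((mask.headD []).length : Int) - 1 - x) + 1) 1).any (fun dx =>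
                (mask.getD (y + dy).toNat []).getD (x + dx).toNat false)))) := rfl
  simp only [Int.toNat_natCast] at hA
  obtain ⟨⟨hGlen, hGrows⟩, hGcell⟩ := pvScatter_all mask
    ((PySem.List.pyRange (-radius) (radius + 1) 1).foldl (fun acc dy =>
      (PySem.List.pyRange (-radius) (radius + 1) 1).foldl (fun acc dx =>
        if ((dx.natAbs : Int) + (dy.natAbs : Int)) ≤ radius then acc ++ [(dx, dy)]
        else acc) acc) [])
    (PySem.List.pyRange 0 (mask.length : Int) 1)
    (List.replicate mask.length (List.replicate (mask.headD []).length false))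
    mask.length (mask.headD []).length (pvOut0_rect _ _)
  rw [hA, hB]
  apply List.ext_getElem
  · rw [hGlen]
    simp [PySem.List.length_pyRange_one]
  intro i hi1 hi2
  rw [hGlen] at hi1
  apply List.ext_getElem
  · rw [hGrows _ (List.getElem_mem _)]
    rw [List.getElem_map]
    simp [PySem.List.length_pyRange_one]
  intro j hj1 hj2
  rw [hGrows _ (List.getElem_mem _)] at hj1
  have hi' : ((i : Int)) < (mask.length : Int) := by exact_mod_cast hi1
  have hj' : ((j : Int)) < ((mask.headD []).length : Int) := by exact_mod_cast hj1
  rw [← pvCell_eq_getElem _ i j (by rw [hGlen]; exact hi1)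
      (by rw [hGrows _ (List.getElem_mem _)]; exact hj1),
    hGcell (i : Int) (j : Int) (by positivity) hi' (by positivity) hj',
    pvCell_out0, Bool.false_or,
    pvAny_eq mask radius (i : Int) (j : Int) (by positivity) hi' (by positivity) hj']
  simp only [List.getElem_map, PySem.List.getElem_pyRange_one]
  norm_num
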